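-- pv_equiv track=rewrite | github.com/hahyuning/Coding-test-study | programmers/level 2/2개 이하로 다른 비트.py | solution
-- ===== SOURCE A (Python) =====
-- def solution(numbers):
--     ans = []
--
--     for num in numbers:
--         if num % 2 == 0:
--             bin_num = list(bin(num)[2:])
--             bin_num[-1] = "1"
--         else:
--             bin_num = "0" + bin(num)[2:]
--             zero = bin_num.rfind("0")
--
--             bin_num = list(bin_num)
--             bin_num[zero] = "1"
--             bin_num[zero + 1] = "0"
--
--         ans.append(int("".join(bin_num), 2))
--     return ans
-- ===== SOURCE B (Python) =====
-- def solution(numbers):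
--     # pure bit arithmetic: even -> set last bit; odd -> flip lowest zero bit
--     # and clear the one below it, i.e. add half the lowest set bit of n+1
--     return [n + 1 if n % 2 == 0 else n + (((n + 1) & -(n + 1)) >> 1) for n in numbers]
-- ===== Notes on version B (the rewrite author's own statement) =====
-- stated objective: alternative
-- what changed: A builds the binary string with bin(), mutates characters found via rfind and re-parses with int(s,2); B computes the same result purely with integer bit arithmetic (even: n+1; odd: add half the lowest set bit of n+1), no strings at all.
-- outside the precondition, e.g. on solution([-3]): A returns [11], B returns [-2]; on solution([-5]): A returns [6], B returns [-3]; on solution([-2]): A raises ValueError, B returns [-1]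
import Mathlib
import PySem

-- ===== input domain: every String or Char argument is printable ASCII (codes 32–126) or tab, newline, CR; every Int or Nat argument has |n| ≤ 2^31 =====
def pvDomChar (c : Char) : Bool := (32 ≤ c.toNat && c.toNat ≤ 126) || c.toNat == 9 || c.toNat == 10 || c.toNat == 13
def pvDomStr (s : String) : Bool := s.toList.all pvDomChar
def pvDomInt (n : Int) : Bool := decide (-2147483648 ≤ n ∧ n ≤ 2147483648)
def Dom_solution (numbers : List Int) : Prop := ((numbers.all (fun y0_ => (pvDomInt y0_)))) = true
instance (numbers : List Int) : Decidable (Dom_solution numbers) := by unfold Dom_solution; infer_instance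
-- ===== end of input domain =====

-- ===== PORT A =====
-- B changes the representation: A manipulates the binary string from bin(); B uses pure integer bit arithmetic (objective: alternative).

-- Python list assignment l[i] = c (negative i from the end; out of range = IndexError, unreachable on the inputs admitted below)
def pySetChar (l : List Char) (i : Int) (c : Char) : List Char :=
  let j := if i < 0 then i + l.length else i
  if 0 <= j && j < l.length then l.set j.toNat c else l

-- int(''.join(cs), 2), ported by hand for the strings this program builds: nonempty, pure '0'/'1' digits
-- (no sign, space, underscore or '0b' prefix ever reaches it under Pre_); exact there.
def pyInt2 (cs : List Char) : Int :=
  cs.foldl (fun acc c => 2 * acc + (if c = '1' then 1 else 0)) 0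

def solution (numbers : List Int) : List Int :=
  numbers.foldl (fun ans num =>
    let binNum :=
      if PySem.Int.mod num 2 = 0 then
        -- bin_num = list(bin(num)[2:]); bin_num[-1] = "1"
        pySetChar ((PySem.Int.toBinChars0b num).drop 2) (-1) '1'
      else
        -- bin_num = "0" + bin(num)[2:]; zero = bin_num.rfind("0"); bin_num[zero] = "1"; bin_num[zero+1] = "0"
        let s := '0' :: (PySem.Int.toBinChars0b num).drop 2
        let zero := PySem.Chars.rfind s ['0']
        pySetChar (pySetChar s zero '1') (zero + 1) '0'
    ans ++ [pyInt2 binNum]) []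

-- ===== PORT B =====
def solution_alt (numbers : List Int) : List Int :=
  numbers.map (fun n =>
    if PySem.Int.mod n 2 = 0 then n + 1
    else n + ((PySem.Int.band (n + 1) (-(n + 1))) >>> (1 : Nat)))

-- ===== PRECONDITION & SPEC =====
-- Pre_ excludes lists containing a negative number: there A raises ValueError from int(s, 2) on almost all of
-- them (the slice bin(num)[2:] of "-0b..." leaves a 'b' in the digit string), and on the rare remaining ones
-- the returned value is an accidental artefact of that slicing.
def Pre_solution (numbers : List Int) : Prop := ∀ x ∈ numbers, 0 ≤ x
instance (numbers : List Int) : Decidable (Pre_solution numbers) := by unfold Pre_solution; infer_instance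
def pvWitness_solution : List Int := [2, 3, 0, 7, 12]

def Spec_solution (numbers : List Int) (out : List Int) : Prop := out = solution_alt numbers
instance (numbers : List Int) (out : List Int) : Decidable (Spec_solution numbers out) := by unfold Spec_solution; infer_instance

-- ===== CLAIM (what is proved, stated in full; the proofs are below) =====
def Claim_equal_solution : Prop := ∀ (numbers : List Int), Dom_solution numbers → Pre_solution numbers → Spec_solution numbers (solution numbers)

-- ===== LEMMAS AND PROOFS =====

-- value of the digit string: accumulator form
theorem pyInt2_foldl_acc (ys : List Char) : ∀ acc : Int,
    ys.foldl (fun acc c => 2 * acc + (if c = '1' then 1 else 0)) acc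
      = acc * 2 ^ ys.length + pyInt2 ys := by
  induction ys with
  | nil => intro acc; simp [pyInt2]
  | cons c ys ih =>
    intro acc
    simp only [List.foldl_cons, pyInt2, List.length_cons]
    rw [ih, ih (2 * 0 + _)]
    ring

theorem pyInt2_append (xs ys : List Char) :
    pyInt2 (xs ++ ys) = pyInt2 xs * 2 ^ ys.length + pyInt2 ys := by
  simp only [pyInt2, List.foldl_append]
  rw [pyInt2_foldl_acc]; rfl

theorem pyInt2_toDigits (a : Nat) : pyInt2 (Nat.toDigits 2 a) = (a : Int) := by
  induction a using Nat.strong_induction_on with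
  | _ a ih =>
    rcases Nat.lt_or_ge a 2 with h | h
    · interval_cases a <;> decide
    · rw [Nat.toDigits_of_base_le (by norm_num) h, pyInt2_append,
        ih (a / 2) (Nat.div_lt_self (by omega) (by norm_num))]
      have hdm := Nat.div_add_mod a 2
      have h2 : a % 2 = 0 ∨ a % 2 = 1 := by omega
      rcases h2 with h2 | h2 <;> rw [h2] <;> simp [pyInt2, Nat.digitChar] <;> omega

theorem pyInt2_replicate (k : Nat) : pyInt2 (List.replicate k '1') = 2 ^ k - 1 := by
  induction k with
  | zero => decide
  | succ k ih =>
    rw [List.replicate_succ]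
    show List.foldl _ (2 * 0 + (if '1' = '1' then 1 else 0)) _ = _
    rw [pyInt2_foldl_acc, ih]
    simp [List.length_replicate]
    ring

theorem pyInt2_cons_zero (xs : List Char) : pyInt2 ('0' :: xs) = pyInt2 xs := by
  show List.foldl _ (2 * 0 + (if '0' = '1' then 1 else 0)) _ = _
  norm_num
  rfl

-- the binary string of n = 2^k*(2q+1) - 1 ends in k ones
theorem toDigits_ones (k q : Nat) (hk : 1 ≤ k) :
    Nat.toDigits 2 (2 ^ k * (2 * q + 1) - 1)
      = (if q = 0 then [] else Nat.toDigits 2 (2 * q)) ++ List.replicate k '1' := by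
  induction k with
  | zero => omega
  | succ k ih =>
    rcases Nat.eq_zero_or_pos k with rfl | hk'
    · rcases Nat.eq_zero_or_pos q with rfl | hq
      · decide
      · have e1 : (2:Nat) ^ 1 = 2 := by norm_num
        have hn : 2 ^ 1 * (2 * q + 1) - 1 = 4 * q + 1 := by rw [e1]; omega
        rw [hn, Nat.toDigits_of_base_le (by norm_num) (by omega)]
        have h1 : (4 * q + 1) / 2 = 2 * q := by omega
        have h2 : (4 * q + 1) % 2 = 1 := by omega
        rw [h1, h2]
        simp [List.replicate, Nat.digitChar]
        omega
    · have hlt : 1 ≤ 2 ^ k * (2 * q + 1) := Nat.one_le_iff_ne_zero.mpr (by positivity)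
      have hn : 2 ^ (k + 1) * (2 * q + 1) - 1
          = 2 * (2 ^ k * (2 * q + 1) - 1) + 1 := by
        have e : 2 ^ (k + 1) * (2 * q + 1) = 2 * (2 ^ k * (2 * q + 1)) := by rw [pow_succ]; ring
        omega
      have hge : 2 ≤ 2 * (2 ^ k * (2 * q + 1) - 1) + 1 := by
        have : 2 ≤ 2 ^ k := Nat.one_lt_two_pow_iff.mpr (by omega)
        have : 2 ≤ 2 ^ k * (2 * q + 1) := le_trans this (Nat.le_mul_of_pos_right _ (by omega))
        omega
      rw [hn, Nat.toDigits_of_base_le (by norm_num) hge]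
      have h1 : (2 * (2 ^ k * (2 * q + 1) - 1) + 1) / 2 = 2 ^ k * (2 * q + 1) - 1 := by omega
      have h2 : (2 * (2 ^ k * (2 * q + 1) - 1) + 1) % 2 = 1 := by omega
      rw [h1, h2, ih hk', List.replicate_succ']
      simp [Nat.digitChar, List.append_assoc]

theorem isPrefixOf_zero (l : List Char) :
    List.isPrefixOf ['0'] l = true ↔ l.head? = some '0' := by
  cases l with
  | nil => simp [List.isPrefixOf]
  | cons c cs =>
    simp only [List.isPrefixOf, List.head?_cons, Option.some.injEq]
    constructor
    · intro h
      have := (Bool.and_eq_true _ _).mp h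
      have h1 := this.1
      exact (beq_iff_eq.mp h1).symm
    · intro h; subst h; simp

theorem rfind_go_spec (s : List Char) (p : Nat) (hp : s[p]? = some '0')
    (hmax : ∀ i, p < i → s[i]? ≠ some '0') :
    ∀ j, p ≤ j → PySem.Chars.rfind.go s ['0'] j = (p : Int) := by
  intro j
  induction j with
  | zero =>
    intro h
    have hp0 : p = 0 := by omega
    subst hp0
    rw [PySem.Chars.rfind.go]
    rw [if_pos ((isPrefixOf_zero s).mpr (by rw [← List.head?_drop (i := 0)] at hp; simpa using hp))]
    simp
  | succ j ih =>
    intro h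
    rw [PySem.Chars.rfind.go]
    rcases Nat.lt_or_ge j.succ p with h1 | h1
    · omega
    rcases Nat.eq_or_lt_of_le h1 with h2 | h2
    · rw [if_pos]
      · rw [h2]
      · refine (isPrefixOf_zero _).mpr ?_
        rw [List.head?_drop]
        have h2' : p = j + 1 := h2
        rw [← h2']
        exact hp
    · rw [if_neg, ih (by omega)]
      rw [isPrefixOf_zero, List.head?_drop]
      exact fun hc => hmax _ (by omega) hc

theorem rfind_spec (s : List Char) (p : Nat) (hp : s[p]? = some '0')
    (hmax : ∀ i, p < i → s[i]? ≠ some '0') :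
    PySem.Chars.rfind s ['0'] = (p : Int) := by
  have hlt : p < s.length := (List.getElem?_eq_some_iff.mp hp).1
  exact rfind_go_spec s p hp hmax s.length (by omega)

theorem land_pred (k q : Nat) :
    (2 ^ (k + 1) * (2 * q + 1)) &&& (2 ^ (k + 1) * (2 * q + 1) - 1) = 2 ^ (k + 1) * (2 * q) := by
  have hsub : 2 ^ (k + 1) * (2 * q + 1) - 1 = 2 ^ (k + 1) * (2 * q) + (2 ^ (k + 1) - 1) := by
    have h1 : 1 ≤ 2 ^ (k + 1) := Nat.one_le_two_pow
    have e : 2 ^ (k + 1) * (2 * q + 1) = 2 ^ (k + 1) * (2 * q) + 2 ^ (k + 1) := by ring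
    omega
  apply Nat.eq_of_testBit_eq
  intro i
  rw [Nat.testBit_land, hsub,
    Nat.testBit_two_pow_mul_add _ (by have : 1 ≤ 2 ^ (k+1) := Nat.one_le_two_pow; omega),
    Nat.testBit_two_pow_mul, Nat.testBit_two_pow_mul]
  rcases Nat.lt_or_ge i (k + 1) with h | h
  · simp [h, Nat.not_le.mpr h]
  · have hi : ¬ i < k + 1 := by omega
    simp only [if_neg hi, ge_iff_le, h, decide_true, Bool.true_and]
    cases hd : i - (k + 1) with
    | zero => simp [Nat.testBit_zero, Nat.mul_mod_right]
    | succ s =>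
      have e1 : (2 * q + 1).testBit (s + 1) = q.testBit s := by
        rw [Nat.testBit_succ]
        congr 1
        omega
      have e2 : (2 * q).testBit (s + 1) = q.testBit s := by
        rw [Nat.testBit_succ]
        congr 1
        omega
      rw [e1, e2, Bool.and_self]

-- B's bit trick: the lowest set bit of a+1, for odd a
theorem band_lowbit (k q a : Nat) (ha : a + 1 = 2 ^ (k + 1) * (2 * q + 1)) :
    PySem.Int.band ((a : Int) + 1) (-((a : Int) + 1)) = (2 : Int) ^ (k + 1) := by
  have h1 : (0 : Int) ≤ (a : Int) + 1 := by positivity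
  have h2 : ¬ (0 : Int) ≤ -((a : Int) + 1) := by omega
  rw [PySem.Int.band]
  simp only [h1, if_pos, if_neg h2]
  have e1 : ((a : Int) + 1).toNat = a + 1 := by omega
  have e2 : (-(-((a : Int) + 1)) - 1).toNat = a := by omega
  rw [e1, e2]
  have h4 : 1 ≤ 2 ^ (k + 1) := Nat.one_le_two_pow
  have e3 : a = 2 ^ (k + 1) * (2 * q + 1) - 1 := by omega
  subst e3
  have e4 : 2 ^ (k + 1) * (2 * q + 1) - 1 + 1 = 2 ^ (k + 1) * (2 * q + 1) := by omega
  rw [e4, land_pred]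
  have e5 : 2 ^ (k + 1) * (2 * q + 1) - 2 ^ (k + 1) * (2 * q) = 2 ^ (k + 1) := by
    have e : 2 ^ (k + 1) * (2 * q + 1) = 2 ^ (k + 1) * (2 * q) + 2 ^ (k + 1) := by ring
    omega
  rw [e5]
  push_cast
  ring

theorem shift_pow (k : Nat) : ((2 : Int) ^ (k + 1)) >>> (1 : Nat) = 2 ^ k := by
  have h1 : ((2 : Int) ^ (k + 1)) = ((2 ^ (k + 1) : Nat) : Int) := by push_cast; ring
  have h2 : (2 ^ (k + 1) : Nat) >>> 1 = 2 ^ k := by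
    rw [Nat.shiftRight_succ, Nat.shiftRight_zero, pow_succ]
    omega
  rw [h1, ← Int.natCast_shiftRight, h2]
  push_cast; ring

theorem binTail (a : Nat) :
    (PySem.Int.toBinChars0b (a : Int)).drop 2 = Nat.toDigits 2 a := by
  have h : ¬ ((a : Int) < 0) := by omega
  simp [PySem.Int.toBinChars0b, h]

theorem pySetChar_neg_one (l : List Char) (h : l ≠ []) (c : Char) :
    pySetChar l (-1) c = l.set (l.length - 1) c := by
  have hlen : 1 ≤ l.length := List.length_pos_iff.mpr h
  unfold pySetChar
  have h1 : (-1 : Int) < 0 := by norm_num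
  simp only [if_pos h1]
  have h2 : ((0 : Int) ≤ -1 + l.length && -1 + (l.length : Int) < l.length) = true := by
    simp only [Bool.and_eq_true, decide_eq_true_eq]
    omega
  rw [if_pos h2]
  congr 1
  omega

theorem pySetChar_natCast (l : List Char) (p : Nat) (hp : p < l.length) (c : Char) :
    pySetChar l (p : Int) c = l.set p c := by
  unfold pySetChar
  have h1 : ¬ ((p : Int) < 0) := by omega
  simp only [if_neg h1]
  have h2 : ((0 : Int) ≤ (p : Int) && (p : Int) < l.length) = true := by
    simp only [Bool.and_eq_true, decide_eq_true_eq]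
    omega
  rw [if_pos h2]
  simp

theorem set_last (l : List Char) (c c' : Char) :
    (l ++ [c]).set l.length c' = l ++ [c'] := by
  rw [List.set_append]
  simp

theorem body_even (a : Nat) (ha : a % 2 = 0) :
    pyInt2 (pySetChar (Nat.toDigits 2 a) (-1) '1') = (a : Int) + 1 := by
  rcases Nat.eq_zero_or_pos a with rfl | hpos
  · decide
  · have h2 : 2 ≤ a := by omega
    rw [Nat.toDigits_of_base_le (by norm_num) h2, ha]
    rw [pySetChar_neg_one _ (by simp)]
    have hl : (Nat.toDigits 2 (a / 2) ++ [Nat.digitChar 0]).length - 1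
        = (Nat.toDigits 2 (a / 2)).length := by
      simp
    rw [hl, set_last, pyInt2_append, pyInt2_toDigits]
    have hdm := Nat.div_add_mod a 2
    simp [pyInt2]
    omega

theorem pyInt2_one_zero_ones (j : Nat) :
    pyInt2 ('1' :: '0' :: List.replicate j '1') = 2 ^ (j + 1) + 2 ^ j - 1 := by
  show List.foldl _ 0 _ = _
  rw [List.foldl_cons, List.foldl_cons]
  norm_num
  rw [pyInt2_foldl_acc, pyInt2_replicate]
  simp [List.length_replicate]
  ring

theorem body_odd (a j q : Nat) (ha : a + 1 = 2 ^ (j + 1) * (2 * q + 1)) :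
    pyInt2 (pySetChar
      (pySetChar ('0' :: Nat.toDigits 2 a) (PySem.Chars.rfind ('0' :: Nat.toDigits 2 a) ['0']) '1')
      (PySem.Chars.rfind ('0' :: Nat.toDigits 2 a) ['0'] + 1) '0') = (a : Int) + 2 ^ j := by
  have h4 : 1 ≤ 2 ^ (j + 1) := Nat.one_le_two_pow
  have haInt : (a : Int) + 1 = 2 ^ (j + 1) * (2 * (q : Int) + 1) := by
    have := congrArg (fun x : Nat => (x : Int)) ha
    push_cast at this
    linarith
  have e3 : a = 2 ^ (j + 1) * (2 * q + 1) - 1 := by omega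
  have hT := toDigits_ones (j + 1) q (by omega)
  rw [← e3] at hT
  rcases Nat.eq_zero_or_pos q with rfl | hq
  · -- a = 2^(j+1) - 1 : the string is '0' followed by j+1 ones
    simp only [if_pos, List.nil_append] at hT
    rw [hT]
    have hz : PySem.Chars.rfind ('0' :: List.replicate (j + 1) '1') ['0'] = ((0 : Nat) : Int) := by
      apply rfind_spec
      · simp
      · intro i hi
        cases i with
        | zero => omega
        | succ i =>
          rw [List.getElem?_cons_succ, List.getElem?_replicate]
          split <;> simp
    rw [hz]
    rw [pySetChar_natCast _ 0 (by simp) '1']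
    have e0 : ((0 : Nat) : Int) + 1 = ((1 : Nat) : Int) := by norm_num
    rw [e0]
    rw [pySetChar_natCast _ 1 (by simp) '0']
    simp only [List.set_cons_zero]
    rw [List.replicate_succ, List.set_cons_succ, List.set_cons_zero]
    rw [pyInt2_one_zero_ones]
    have ea : (a : Int) = 2 ^ (j + 1) - 1 := by push_cast at haInt; linarith
    rw [ea]
    ring
  · -- q ≥ 1 : the string is '0' :: toDigits 2 q ++ '0' :: ones
    have h2q : 2 ≤ 2 * q := by omega
    have hfront : Nat.toDigits 2 (2 * q) = Nat.toDigits 2 q ++ ['0'] := by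
      rw [Nat.toDigits_of_base_le (by norm_num) h2q]
      have hd : (2 * q) / 2 = q := by omega
      have hm : (2 * q) % 2 = 0 := by omega
      rw [hd, hm]
      rfl
    rw [hT, if_neg (by omega), hfront]
    have hregroup : '0' :: ((Nat.toDigits 2 q ++ ['0']) ++ List.replicate (j + 1) '1')
        = ('0' :: Nat.toDigits 2 q) ++ ('0' :: List.replicate (j + 1) '1') := by
      simp [List.append_assoc]
    rw [hregroup]
    set L1 : List Char := '0' :: Nat.toDigits 2 q with hL1
    set R : List Char := '0' :: List.replicate (j + 1) '1' with hR
    have hz : PySem.Chars.rfind (L1 ++ R) ['0'] = ((L1.length : Nat) : Int) := by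
      apply rfind_spec
      · rw [List.getElem?_append_right (le_refl _)]
        simp [hR]
      · intro i hi
        rcases Nat.lt_or_ge i (L1 ++ R).length with hlt | hge
        · rw [List.getElem?_append_right (by omega)]
          have hsplit : i - L1.length = (i - L1.length - 1) + 1 := by omega
          rw [hR, hsplit, List.getElem?_cons_succ, List.getElem?_replicate]
          split <;> simp
        · rw [List.getElem?_eq_none_iff.mpr (by omega)]
          simp
    rw [hz]
    have hlen1 : L1.length < (L1 ++ R).length := by
      simp [hR, List.length_append]
    rw [pySetChar_natCast _ _ hlen1 '1']
    have hset1 : (L1 ++ R).set L1.length '1' = L1 ++ ('1' :: List.replicate (j + 1) '1') := by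
      rw [List.set_append]
      simp [hR]
    rw [hset1]
    have ecast : ((L1.length : Nat) : Int) + 1 = (((L1.length + 1 : Nat)) : Int) := by push_cast; ring
    rw [ecast]
    have hlen2 : L1.length + 1 < (L1 ++ ('1' :: List.replicate (j + 1) '1')).length := by
      simp [List.length_append, List.length_replicate]
    rw [pySetChar_natCast _ _ hlen2 '0']
    have hset2 : (L1 ++ ('1' :: List.replicate (j + 1) '1')).set (L1.length + 1) '0'
        = L1 ++ ('1' :: '0' :: List.replicate j '1') := by
      rw [List.set_append]
      rw [if_neg (by omega)]
      have : L1.length + 1 - L1.length = 1 := by omega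
      rw [this, List.set_cons_succ, List.replicate_succ, List.set_cons_zero]
    rw [hset2, pyInt2_append]
    have hv1 : pyInt2 L1 = (q : Int) := by
      rw [hL1, pyInt2_cons_zero, pyInt2_toDigits]
    rw [hv1, pyInt2_one_zero_ones]
    have hlen3 : ('1' :: '0' :: List.replicate j '1').length = j + 2 := by
      simp [List.length_replicate]
    rw [hlen3]
    have e2 : (2 : Int) ^ (j + 2) = 2 ^ (j + 1) * 2 := by ring
    have e1 : (2 : Int) ^ (j + 1) = 2 ^ j * 2 := by ring
    nlinarith [haInt]

theorem foldl_append_map (g : Int → Int) (l : List Int) : ∀ acc : List Int,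
    l.foldl (fun ans num => ans ++ [g num]) acc = acc ++ l.map g := by
  induction l with
  | nil => intro acc; simp
  | cons x l ih => intro acc; simp [ih]

theorem body_eq (n : Int) (h0 : 0 ≤ n) :
    pyInt2 (if PySem.Int.mod n 2 = 0 then
        pySetChar ((PySem.Int.toBinChars0b n).drop 2) (-1) '1'
      else
        let s := '0' :: (PySem.Int.toBinChars0b n).drop 2
        let zero := PySem.Chars.rfind s ['0']
        pySetChar (pySetChar s zero '1') (zero + 1) '0')
      = (if PySem.Int.mod n 2 = 0 then n + 1
         else n + ((PySem.Int.band (n + 1) (-(n + 1))) >>> (1 : Nat))) := by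
  obtain ⟨a, rfl⟩ : ∃ a : Nat, n = (a : Int) := ⟨n.toNat, (Int.toNat_of_nonneg h0).symm⟩
  have hmod : PySem.Int.mod (a : Int) 2 = ((a % 2 : Nat) : Int) := by
    rw [show (2 : Int) = ((2 : Nat) : Int) by norm_num, PySem.Int.mod_natCast]
  rcases Nat.mod_two_eq_zero_or_one a with hpar | hpar
  · have hc : PySem.Int.mod (a : Int) 2 = 0 := by rw [hmod, hpar]; norm_num
    rw [if_pos hc, if_pos hc, binTail, body_even a hpar]
  · have hc : ¬ PySem.Int.mod (a : Int) 2 = 0 := by rw [hmod, hpar]; norm_num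
    rw [if_neg hc, if_neg hc]
    obtain ⟨k, m, hodd, he⟩ := Nat.exists_eq_two_pow_mul_odd (n := a + 1) (by omega)
    obtain ⟨q, rfl⟩ := hodd
    obtain ⟨j, rfl⟩ : ∃ j, k = j + 1 := by
      cases k with
      | zero =>
        exfalso
        simp only [pow_zero, one_mul] at he
        omega
      | succ j => exact ⟨j, rfl⟩
    show pyInt2 (pySetChar (pySetChar _ _ '1') _ '0') = _
    rw [binTail, body_odd a j q he, band_lowbit j q a he, shift_pow]

-- ===== VERDICT (by name: the statement is the Claim_ definition above) =====
theorem solution_spec : Claim_equal_solution := by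
  intro numbers _ hpre
  unfold Spec_solution solution solution_alt
  rw [show (numbers.foldl (fun ans num =>
      let binNum :=
        if PySem.Int.mod num 2 = 0 then
          pySetChar ((PySem.Int.toBinChars0b num).drop 2) (-1) '1'
        else
          let s := '0' :: (PySem.Int.toBinChars0b num).drop 2
          let zero := PySem.Chars.rfind s ['0']
          pySetChar (pySetChar s zero '1') (zero + 1) '0'
      ans ++ [pyInt2 binNum]) [])
    = numbers.map (fun num => pyInt2 (
        if PySem.Int.mod num 2 = 0 then
          pySetChar ((PySem.Int.toBinChars0b num).drop 2) (-1) '1'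
        else
          let s := '0' :: (PySem.Int.toBinChars0b num).drop 2
          let zero := PySem.Chars.rfind s ['0']
          pySetChar (pySetChar s zero '1') (zero + 1) '0'))
    from (foldl_append_map _ numbers []).trans (List.nil_append _)]
  exact List.map_congr_left (fun n hn => body_eq n (hpre n hn))
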